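-- pv_equiv track=rewrite | github.com/honovation/veil | src/veil_component/component_map.py | filter_dependent_component_names
-- ===== SOURCE A (Python) =====
-- def filter_dependent_component_names(my_component_name, component_names, dependencies):
--     dependent_component_names = set()
--     for component_name in component_names:
--         for dependency in dependencies:
--             if my_component_name == dependency or dependency.startswith('{}.'.format(my_component_name)):
--                 continue # exclude myself and my children
--             if component_name == dependency or dependency.startswith('{}.'.format(component_name)):
--                 if my_component_name.startswith('{}.'.format(component_name)):
--                     continue # exclude my parents
--                 dependent_component_names.add(component_name)
--     return dependent_component_names
-- ===== SOURCE B (Python) =====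
-- def filter_dependent_component_names(my_component_name, component_names, dependencies):
--     # Invert the scan: instead of testing every (component, dependency) pair,
--     # walk the dependencies once and look up each dependency's dot-prefixes in a hash set.
--     my_prefix = '{}.'.format(my_component_name)
--     wanted = set(component_names)
--     matched = set()
--     for dependency in dependencies:
--         if dependency == my_component_name or dependency.startswith(my_prefix):
--             continue  # exclude myself and my children
--         # a component c matches this dependency iff c == dependency
--         # or dependency starts with c + '.', i.e. c is a dot-prefix of dependency
--         for candidate in [dependency] + [dependency[:i] for i, ch in enumerate(dependency) if ch == '.']:
--             if candidate in wanted and not my_component_name.startswith('{}.'.format(candidate)):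
--                 matched.add(candidate)
--     return {c for c in component_names if c in matched}
-- ===== Notes on version B (the rewrite author's own statement) =====
-- stated objective: faster
-- what changed: Instead of testing every (component, dependency) pair with string prefix checks, B walks the dependencies once, enumerates each dependency's dot-prefixes (plus the dependency itself) and looks them up in a hash set of the component names, then emits the component names that were matched.
import Mathlib
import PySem

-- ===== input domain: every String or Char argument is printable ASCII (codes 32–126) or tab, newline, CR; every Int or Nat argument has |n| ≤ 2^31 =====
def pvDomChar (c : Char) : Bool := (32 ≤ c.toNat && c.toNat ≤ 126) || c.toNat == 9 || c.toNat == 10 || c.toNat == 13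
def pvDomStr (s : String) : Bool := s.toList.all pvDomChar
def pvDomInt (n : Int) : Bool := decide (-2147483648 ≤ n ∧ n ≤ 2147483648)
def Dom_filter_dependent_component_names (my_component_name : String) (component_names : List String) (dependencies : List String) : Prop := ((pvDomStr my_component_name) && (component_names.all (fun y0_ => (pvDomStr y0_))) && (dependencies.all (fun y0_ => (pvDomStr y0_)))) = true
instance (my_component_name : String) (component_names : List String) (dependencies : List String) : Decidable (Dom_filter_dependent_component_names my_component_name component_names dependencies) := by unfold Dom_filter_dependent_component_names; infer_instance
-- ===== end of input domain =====

-- B inverts the scan: one pass over dependencies, looking up each dependency's dot-prefixes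
-- in a hash set of the component names, instead of testing every (component, dependency) pair.

-- ===== PORT A =====
def filter_dependent_component_names (my_component_name : String) (component_names : List String) (dependencies : List String) : List String :=
  component_names.foldl (fun dependent_component_names component_name =>
    dependencies.foldl (fun dependent_component_names dependency =>
      if my_component_name == dependency || PySem.Str.startswith dependency (my_component_name ++ ".") then
        dependent_component_names  -- exclude myself and my children
      else if component_name == dependency || PySem.Str.startswith dependency (component_name ++ ".") then
        if PySem.Str.startswith my_component_name (component_name ++ ".") then
          dependent_component_names  -- exclude my parents
        else
          PySem.Set.add dependent_component_names component_name
      else dependent_component_names) dependent_component_names) PySem.Set.empty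

-- ===== PORT B =====
def filter_dependent_component_names_alt (my_component_name : String) (component_names : List String) (dependencies : List String) : List String :=
  let my_prefix := my_component_name ++ "."
  let wanted : PySem.Set String := PySem.Set.ofList component_names
  let matched : PySem.Set String := dependencies.foldl (fun matched dependency =>
    if dependency == my_component_name || PySem.Str.startswith dependency my_prefix then
      matched  -- exclude myself and my children
    else
      (dependency :: ((PySem.List.enumerate dependency.toList).filter (fun p => p.2 == '.')).map
          (fun p => PySem.Str.slice dependency none (some p.1))).foldl
        (fun matched candidate =>
          if PySem.Set.contains wanted candidate && !(PySem.Str.startswith my_component_name (candidate ++ ".")) then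
            PySem.Set.add matched candidate
          else matched) matched) PySem.Set.empty
  PySem.Set.ofList (component_names.filter (fun c => PySem.Set.contains matched c))

-- ===== PRECONDITION & SPEC =====
def Spec_filter_dependent_component_names (my_component_name : String) (component_names : List String) (dependencies : List String) (out : List String) : Prop := out = filter_dependent_component_names_alt my_component_name component_names dependencies
instance (my_component_name : String) (component_names : List String) (dependencies : List String) (out : List String) : Decidable (Spec_filter_dependent_component_names my_component_name component_names dependencies out) := by unfold Spec_filter_dependent_component_names; infer_instance

-- ===== CLAIM (what is proved, stated in full; the proofs are below) =====
def Claim_equal_filter_dependent_component_names : Prop := ∀ (my_component_name : String) (component_names : List String) (dependencies : List String), Dom_filter_dependent_component_names my_component_name component_names dependencies → Spec_filter_dependent_component_names my_component_name component_names dependencies (filter_dependent_component_names my_component_name component_names dependencies)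

-- ===== LEMMAS AND PROOFS =====

-- the per-pair tests, shared vocabulary of the proofs
def pvExcl (my dep : String) : Bool := my == dep || PySem.Str.startswith dep (my ++ ".")
def pvMatch (c dep : String) : Bool := c == dep || PySem.Str.startswith dep (c ++ ".")
def pvParent (my c : String) : Bool := PySem.Str.startswith my (c ++ ".")
def pvCands (dep : String) : List String :=
  dep :: ((PySem.List.enumerate dep.toList).filter (fun p => p.2 == '.')).map
      (fun p => PySem.Str.slice dep none (some p.1))
def pvQ (my : String) (deps : List String) (c : String) : Bool :=
  deps.any (fun dep => !pvExcl my dep && pvMatch c dep) && !pvParent my c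

-- dot-prefix characterisation
theorem pv_dotPrefix_iff (cs ds : List Char) :
    cs ++ ['.'] <+: ds ↔ ∃ k, ∃ h : k < ds.length, ds[k] = '.' ∧ cs = ds.take k := by
  constructor
  · rintro ⟨t, rfl⟩
    refine ⟨cs.length, by simp, ?_, ?_⟩
    · simp
    · rw [List.append_assoc, List.singleton_append, List.take_left]
  · rintro ⟨k, hk, hdot, rfl⟩
    refine ⟨ds.drop (k+1), ?_⟩
    rw [List.append_assoc, List.singleton_append, ← hdot, ← List.drop_eq_getElem_cons hk,
      List.take_append_drop]

theorem pv_match_iff_mem_cands (c dep : String) :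
    pvMatch c dep = true ↔ c ∈ pvCands dep := by
  have hmem : c ∈ pvCands dep ↔ c = dep ∨
      ∃ k, ∃ h : k < dep.toList.length, dep.toList[k] = '.' ∧ c.toList = dep.toList.take k := by
    simp only [pvCands, List.mem_cons, List.mem_map, List.mem_filter,
      PySem.List.mem_enumerate_iff]
    constructor
    · rintro (rfl | ⟨p, ⟨⟨k, hk, rfl⟩, hdot⟩, rfl⟩)
      · exact Or.inl rfl
      · refine Or.inr ⟨k, hk, by simpa using hdot, ?_⟩
        simp [PySem.Str.toList_slice, PySem.Chars.slice_eq_listSlice]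
    · rintro (rfl | ⟨k, hk, hdot, hc⟩)
      · exact Or.inl rfl
      · refine Or.inr ⟨((0:Int) + k, dep.toList[k]), ⟨⟨k, hk, rfl⟩, by simpa using hdot⟩, ?_⟩
        apply String.toList_inj.mp
        rw [hc]
        simp [PySem.Str.toList_slice, PySem.Chars.slice_eq_listSlice]
  rw [hmem]
  simp only [pvMatch, Bool.or_eq_true, beq_iff_eq]
  rw [PySem.Str.startswith_eq]
  have : (c ++ ".").toList = c.toList ++ ['.'] := by
    rw [String.toList_append]; rfl
  rw [show PySem.Chars.startswith dep.toList (c ++ ".").toList = true ↔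
        (c ++ ".").toList <+: dep.toList from PySem.Chars.startswith_iff .. , this,
    pv_dotPrefix_iff]

-- adding an element twice is adding it once
theorem pv_add_add (s : PySem.Set String) (c : String) :
    (PySem.Set.add s c).add c = PySem.Set.add s c := by
  by_cases hc : c ∈ s
  · simp [PySem.Set.add, PySem.Set.contains, hc]
  · simp [PySem.Set.add, PySem.Set.contains, hc]

-- A's inner loop over dependencies collapses to one conditional add
theorem pv_A_inner (my c : String) (deps : List String) (s : PySem.Set String) :
    deps.foldl (fun dcn dep =>
      if my == dep || PySem.Str.startswith dep (my ++ ".") then dcn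
      else if c == dep || PySem.Str.startswith dep (c ++ ".") then
        if PySem.Str.startswith my (c ++ ".") then dcn
        else PySem.Set.add dcn c
      else dcn) s
    = if (deps.any (fun dep => !pvExcl my dep && pvMatch c dep)) && !pvParent my c
      then PySem.Set.add s c else s := by
  induction deps generalizing s with
  | nil => simp
  | cons d deps ih =>
    rw [List.foldl_cons, List.any_cons]
    by_cases hd : (my == d || PySem.Str.startswith d (my ++ ".")) = true
    · have hex : pvExcl my d = true := hd
      rw [if_pos hd, ih, hex]
      simp
    · have hex : pvExcl my d = false := Bool.of_not_eq_true hd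
      rw [if_neg hd, hex]
      by_cases hm : (c == d || PySem.Str.startswith d (c ++ ".")) = true
      · have hmm : pvMatch c d = true := hm
        rw [if_pos hm, hmm]
        by_cases hp : PySem.Str.startswith my (c ++ ".") = true
        · have hpp : pvParent my c = true := hp
          rw [if_pos hp, ih, hpp]
          simp
        · have hpp : pvParent my c = false := Bool.of_not_eq_true hp
          rw [if_neg hp, ih, hpp]
          rw [Bool.not_false, Bool.and_true]
          by_cases ha : (List.any deps fun dep => !pvExcl my dep && pvMatch c dep) = true
          · rw [if_pos ha, if_pos (by simp [ha]), pv_add_add]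
          · rw [if_neg ha]
            simp only [Bool.not_eq_true] at ha
            simp [ha]
      · have hmm : pvMatch c d = false := Bool.of_not_eq_true hm
        rw [if_neg hm, ih, hmm]
        simp

-- conditional-add fold = ofList of the filtered list
theorem pv_condAdd (q : String → Bool) (l : List String) (s : PySem.Set String) :
    l.foldl (fun s c => if q c then PySem.Set.add s c else s) s
    = (l.filter q).foldl PySem.Set.add s := by
  induction l generalizing s with
  | nil => rfl
  | cons a l ih =>
    by_cases h : q a = true <;> simp [h, ih, List.foldl_cons]

-- membership in B's candidate loop
theorem pv_B_cand (my : String) (wanted : PySem.Set String) (l : List String)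
    (m : PySem.Set String) (c : String) :
    (c ∈ l.foldl (fun m cand =>
        if PySem.Set.contains wanted cand && !(PySem.Str.startswith my (cand ++ ".")) then
          PySem.Set.add m cand
        else m) m)
    ↔ c ∈ m ∨ (c ∈ l ∧ PySem.Set.contains wanted c = true ∧ pvParent my c = false) := by
  induction l generalizing m with
  | nil => simp
  | cons a l ih =>
    simp only [List.foldl_cons]
    by_cases ha : (PySem.Set.contains wanted a && !(PySem.Str.startswith my (a ++ "."))) = true
    · rw [if_pos ha, ih]
      simp only [Bool.and_eq_true, Bool.not_eq_true', ] at ha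
      constructor
      · rintro (h | ⟨hc, hk⟩)
        · rcases (PySem.Set.mem_add m a c).mp h with h | rfl
          · exact Or.inl h
          · exact Or.inr ⟨List.mem_cons_self .., ha.1, ha.2⟩
        · exact Or.inr ⟨List.mem_cons_of_mem _ hc, hk⟩
      · rintro (h | ⟨hc, hk⟩)
        · exact Or.inl ((PySem.Set.mem_add m a c).mpr (Or.inl h))
        · rcases List.mem_cons.mp hc with rfl | hc
          · exact Or.inl ((PySem.Set.mem_add m c c).mpr (Or.inr rfl))
          · exact Or.inr ⟨hc, hk⟩
    · rw [if_neg ha, ih]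
      simp only [Bool.and_eq_true, Bool.not_eq_true', not_and] at ha
      constructor
      · rintro (h | ⟨hc, hk⟩)
        · exact Or.inl h
        · exact Or.inr ⟨List.mem_cons_of_mem _ hc, hk⟩
      · rintro (h | ⟨hc, hk⟩)
        · exact Or.inl h
        · rcases List.mem_cons.mp hc with rfl | hc
          · exact absurd hk.2 (by simpa [pvParent, hk.1] using ha hk.1)
          · exact Or.inr ⟨hc, hk⟩

-- membership in B's matched set
theorem pv_B_mem (my : String) (wanted : PySem.Set String) (deps : List String)
    (m : PySem.Set String) (c : String) :
    (c ∈ deps.foldl (fun m dep =>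
        if dep == my || PySem.Str.startswith dep (my ++ ".") then m
        else (pvCands dep).foldl (fun m cand =>
          if PySem.Set.contains wanted cand && !(PySem.Str.startswith my (cand ++ ".")) then
            PySem.Set.add m cand
          else m) m) m)
    ↔ c ∈ m ∨ ((∃ dep ∈ deps, pvExcl my dep = false ∧ c ∈ pvCands dep)
        ∧ PySem.Set.contains wanted c = true ∧ pvParent my c = false) := by
  induction deps generalizing m with
  | nil => simp
  | cons d deps ih =>
    rw [List.foldl_cons]
    by_cases hd : (d == my || PySem.Str.startswith d (my ++ ".")) = true
    · have hex : pvExcl my d = true := by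
        simp only [pvExcl, Bool.or_eq_true, beq_iff_eq] at hd ⊢
        rcases hd with h | h
        · exact Or.inl h.symm
        · exact Or.inr h
      rw [if_pos hd, ih]
      constructor
      · rintro (h | ⟨⟨dep, hm, he, hc⟩, hk⟩)
        · exact Or.inl h
        · exact Or.inr ⟨⟨dep, List.mem_cons_of_mem _ hm, he, hc⟩, hk⟩
      · rintro (h | ⟨⟨dep, hm, he, hc⟩, hk⟩)
        · exact Or.inl h
        · rcases List.mem_cons.mp hm with rfl | hm
          · rw [hex] at he; cases he
          · exact Or.inr ⟨⟨dep, hm, he, hc⟩, hk⟩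
    · have hex : pvExcl my d = false := by
        simp only [pvExcl]
        simp only [Bool.or_eq_true, not_or, beq_iff_eq, Bool.not_eq_true] at hd
        simp only [Bool.or_eq_false_iff, beq_eq_false_iff_ne, ne_eq, hd.2, and_true]
        exact fun h => hd.1 h.symm
      rw [if_neg hd, ih, pv_B_cand]
      constructor
      · rintro ((h | ⟨hc, hw, hp⟩) | ⟨⟨dep, hm, he, hc⟩, hk⟩)
        · exact Or.inl h
        · exact Or.inr ⟨⟨d, List.mem_cons_self, hex, hc⟩, hw, hp⟩
        · exact Or.inr ⟨⟨dep, List.mem_cons_of_mem _ hm, he, hc⟩, hk⟩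
      · rintro (h | ⟨⟨dep, hm, he, hc⟩, hk⟩)
        · exact Or.inl (Or.inl h)
        · rcases List.mem_cons.mp hm with rfl | hm
          · exact Or.inl (Or.inr ⟨hc, hk⟩)
          · exact Or.inr ⟨⟨dep, hm, he, hc⟩, hk⟩

-- ===== VERDICT (by name: the statement is the Claim_ definition above) =====
theorem filter_dependent_component_names_spec : Claim_equal_filter_dependent_component_names := by
  intro my cns deps _
  unfold Spec_filter_dependent_component_names
  have hA : filter_dependent_component_names my cns deps
      = PySem.Set.ofList (cns.filter (pvQ my deps)) := by
    unfold filter_dependent_component_names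
    rw [PySem.List.foldl_congr_mem cns _
      (fun s c => if pvQ my deps c then PySem.Set.add s c else s) PySem.Set.empty
      (fun s c _ => by rw [pv_A_inner]; simp only [pvQ]; rfl)]
    rw [PySem.Set.ofList_eq_foldl, pv_condAdd]
    rfl
  have hB : filter_dependent_component_names_alt my cns deps
      = PySem.Set.ofList (cns.filter (pvQ my deps)) := by
    show PySem.Set.ofList (cns.filter
        (fun c => PySem.Set.contains (deps.foldl (fun m dep =>
          if dep == my || PySem.Str.startswith dep (my ++ ".") then m
          else (pvCands dep).foldl (fun m cand =>
            if PySem.Set.contains (PySem.Set.ofList cns) cand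
                && !(PySem.Str.startswith my (cand ++ ".")) then
              PySem.Set.add m cand
            else m) m) PySem.Set.empty) c)) = _
    refine congrArg _ (List.filter_congr fun c hc => ?_)
    rw [Bool.eq_iff_iff]
    have hw : PySem.Set.contains (PySem.Set.ofList cns) c = true := by
      simp [PySem.Set.contains, PySem.Set.mem_ofList, hc]
    constructor
    · intro h
      rcases (pv_B_mem my (PySem.Set.ofList cns) deps PySem.Set.empty c).mp
        (by simpa [PySem.Set.contains] using h) with h0 | ⟨⟨dep, hd, he, hcand⟩, _, hp⟩
      · cases h0
      · simp only [pvQ, Bool.and_eq_true, List.any_eq_true, Bool.not_eq_true', hp, and_true]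
        exact ⟨dep, hd, by simp [he, (pv_match_iff_mem_cands c dep).mpr hcand]⟩
    · intro h
      simp only [pvQ, Bool.and_eq_true, List.any_eq_true, Bool.not_eq_true'] at h
      obtain ⟨⟨dep, hd, hb⟩, hp⟩ := h
      have hm := (pv_B_mem my (PySem.Set.ofList cns) deps PySem.Set.empty c).mpr
        (Or.inr ⟨⟨dep, hd, hb.1, (pv_match_iff_mem_cands c dep).mp hb.2⟩, hw, hp⟩)
      simpa [PySem.Set.contains] using hm
  rw [hA, hB]
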